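-- pv_equiv track=rewrite | github.com/croner01/logoscope | query-service/api/query_params.py | expand_level_match_values
-- ===== SOURCE A (Python) =====
-- from typing import Any, Dict, List, Optional, Set, Tuple
--
-- def normalize_optional_str_list(value: Any) -> List[str]:
--     """Normalize optional string list from list/set/comma-separated input."""
--     if value is None:
--         return []
--
--     raw_values: List[str] = []
--     if isinstance(value, str):
--         raw_values = [value]
--     elif isinstance(value, (list, tuple, set)):
--         raw_values = [item for item in value if isinstance(item, str)]
--     else:
--         return []
--
--     normalized: List[str] = []
--     seen: Set[str] = set()
--     for raw in raw_values:
--         for part in raw.split(","):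
--             item = part.strip()
--             if item and item not in seen:
--                 seen.add(item)
--                 normalized.append(item)
--     return normalized
--
-- def normalize_level_values(value: Any) -> List[str]:
--     """Normalize log levels and align WARNING/WARN aliases."""
--     levels: List[str] = []
--     for item in normalize_optional_str_list(value):
--         normalized = item.upper()
--         if normalized == "WARNING":
--             normalized = "WARN"
--         levels.append(normalized)
--     return normalize_optional_str_list(levels)
--
-- def expand_level_match_values(levels: List[str]) -> List[str]:
--     """Expand level matching values for WARN/WARNING compatibility."""
--     expanded: List[str] = []
--     for level in normalize_level_values(levels):
--         if level == "WARN":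
--             expanded.extend(["WARN", "WARNING"])
--         else:
--             expanded.append(level)
--     return normalize_optional_str_list(expanded)
-- ===== SOURCE B (Python) =====
-- def expand_level_match_values(levels):
--     """Expand level matching values for WARN/WARNING compatibility.
--
--     Single fused pass: normalize the container, then split/strip/uppercase,
--     alias WARNING->WARN, expand WARN to the WARN/WARNING pair, and dedup
--     with one seen-set while preserving first-occurrence order.
--     """
--     if levels is None:
--         return []
--     if isinstance(levels, str):
--         raw_values = [levels]
--     elif isinstance(levels, (list, tuple, set)):
--         raw_values = [item for item in levels if isinstance(item, str)]
--     else: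
--         return []
--     seen = set()
--     out = []
--     for raw in raw_values:
--         for part in raw.split(","):
--             token = part.strip().upper()
--             if not token:
--                 continue
--             if token == "WARNING":
--                 token = "WARN"
--             for value in (["WARN", "WARNING"] if token == "WARN" else [token]):
--                 if value not in seen:
--                     seen.add(value)
--                     out.append(value)
--     return out
-- ===== Notes on version B (the rewrite author's own statement) =====
-- stated objective: simpler
-- what changed: A runs a three-stage pipeline (dedup tokens, then uppercase/alias and dedup again, then expand WARN and dedup a third time, re-splitting and re-stripping every intermediate list); B is one self-contained fused pass that splits/strips/uppercases/aliases each token, expands WARN to the WARN/WARNING pair and dedups once with a single seen-set in first-occurrence order.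
import Mathlib
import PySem

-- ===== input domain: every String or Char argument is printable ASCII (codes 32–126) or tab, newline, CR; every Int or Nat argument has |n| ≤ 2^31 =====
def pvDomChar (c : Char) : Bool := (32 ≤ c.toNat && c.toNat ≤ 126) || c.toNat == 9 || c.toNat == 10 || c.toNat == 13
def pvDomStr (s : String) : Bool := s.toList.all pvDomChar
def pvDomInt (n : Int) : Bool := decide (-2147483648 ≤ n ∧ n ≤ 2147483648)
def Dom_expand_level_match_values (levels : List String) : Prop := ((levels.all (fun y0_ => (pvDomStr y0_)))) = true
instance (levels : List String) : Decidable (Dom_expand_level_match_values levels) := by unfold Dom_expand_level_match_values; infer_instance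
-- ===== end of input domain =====

-- B is a single fused pass (split/strip/normalize/expand/dedup in one loop with one seen-set)
-- replacing A's chain of three dedup passes; equivalence of the RETURN value is what is proved.

-- ===== PORT A =====
-- normalize_optional_str_list, specialized to a List String argument (every item is a str)
def pvNormalizeOptionalStrList (value : List String) : List String :=
  (value.foldl
    (fun (st : List String × PySem.Set String) raw =>
      ((PySem.Str.split? raw ",").getD []).foldl
        (fun (st : List String × PySem.Set String) part =>
          let item := PySem.Str.strip part
          if item ≠ "" ∧ item ∉ st.2 then (st.1 ++ [item], PySem.Set.add st.2 item) else st)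
        st)
    (([] : List String), (PySem.Set.empty : PySem.Set String))).1

def pvNormalizeLevelValues (value : List String) : List String :=
  let levels := (pvNormalizeOptionalStrList value).foldl
    (fun (acc : List String) item =>
      let normalized := PySem.Str.upper item
      let normalized := if normalized = "WARNING" then "WARN" else normalized
      acc ++ [normalized]) []
  pvNormalizeOptionalStrList levels

def expand_level_match_values (levels : List String) : List String :=
  let expanded := (pvNormalizeLevelValues levels).foldl
    (fun (acc : List String) level =>
      if level = "WARN" then acc ++ ["WARN", "WARNING"] else acc ++ [level]) []
  pvNormalizeOptionalStrList expanded

-- ===== PORT B =====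
def expand_level_match_values_alt (levels : List String) : List String :=
  (levels.foldl
    (fun (st : List String × PySem.Set String) raw =>
      ((PySem.Str.split? raw ",").getD []).foldl
        (fun (st : List String × PySem.Set String) part =>
          let token := PySem.Str.upper (PySem.Str.strip part)
          if token = "" then st
          else
            let token := if token = "WARNING" then "WARN" else token
            (if token = "WARN" then ["WARN", "WARNING"] else [token]).foldl
              (fun (st : List String × PySem.Set String) value =>
                if value ∉ st.2 then (st.1 ++ [value], PySem.Set.add st.2 value) else st)
              st)
        st)
    (([] : List String), (PySem.Set.empty : PySem.Set String))).1

-- ===== PRECONDITION & SPEC =====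
def Spec_expand_level_match_values (levels : List String) (out : List String) : Prop := out = expand_level_match_values_alt levels
instance (levels : List String) (out : List String) : Decidable (Spec_expand_level_match_values levels out) := by unfold Spec_expand_level_match_values; infer_instance

-- ===== CLAIM (what is proved, stated in full; the proofs are below) =====
def Claim_equal_expand_level_match_values : Prop := ∀ (levels : List String), Dom_expand_level_match_values levels → Spec_expand_level_match_values levels (expand_level_match_values levels)

-- ===== LEMMAS AND PROOFS =====

-- first-occurrence dedup of a token stream, given an already-seen list
def pvFd (seen : List String) : List String → List String
  | [] => []
  | x :: xs => if x ∈ seen then pvFd seen xs else x :: pvFd (seen ++ [x]) xs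

-- the comma/strip/nonempty token stream one raw string contributes in A's normalize pass
def pvToks (raw : String) : List String :=
  ((((PySem.Str.split? raw ",").getD []).map PySem.Str.strip).filter (fun t => t ≠ ""))

def pvCanon (t : String) : String :=
  if PySem.Str.upper t = "WARNING" then "WARN" else PySem.Str.upper t

def pvEx (s : String) : List String := if s = "WARN" then ["WARN", "WARNING"] else [s]

-- single-character splitter mirroring str.split(",")
def pvSplitc (c : Char) : List Char → List (List Char)
  | [] => [[]]
  | x :: xs =>
    if x = c then [] :: pvSplitc c xs
    else
      match pvSplitc c xs with
      | [] => [[x]]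
      | p :: ps => (x :: p) :: ps

theorem pvSplitc_ne_nil (c : Char) (l : List Char) : pvSplitc c l ≠ [] := by
  induction l with
  | nil => simp [pvSplitc]
  | cons x xs ih =>
    simp only [pvSplitc]
    split
    · simp
    · rcases hE : pvSplitc c xs with _ | ⟨p, ps⟩
      · exact absurd hE ih
      · simp []

theorem pvGo_eq (c : Char) : ∀ (fuel : Nat) (l : List Char), l.length < fuel → ∀ cur acc,
    PySem.Chars.splitOn.go [c] fuel l cur acc
      = acc.reverse ++ (pvSplitc c l).modifyHead (fun p => cur.reverse ++ p) := by
  intro fuel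
  induction fuel with
  | zero => intro l h; omega
  | succ fuel ih =>
    intro l h cur acc
    cases l with
    | nil =>
      rw [PySem.Chars.splitOn.go.eq_def]
      simp [pvSplitc]
    | cons x rest =>
      rw [PySem.Chars.splitOn.go.eq_def]
      simp only [List.isPrefixOf, Bool.and_true]
      by_cases hx : c = x
      · rw [if_pos (by simp [hx])]
        rw [show List.drop [c].length (x :: rest) = rest from rfl]
        rw [ih rest (by simpa using h) [] (cur.reverse :: acc)]
        rcases hE : pvSplitc c rest with _ | ⟨p, ps⟩
        · exact absurd hE (pvSplitc_ne_nil c rest)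
        · simp [pvSplitc, ← hx, hE]
      · rw [if_neg (by simp [hx])]
        rw [ih rest (by simpa using h) (x :: cur) acc]
        rcases hE : pvSplitc c rest with _ | ⟨p, ps⟩
        · exact absurd hE (pvSplitc_ne_nil c rest)
        · have hxc : ¬ (x = c) := fun hh => hx hh.symm
          simp [pvSplitc, hxc, hE]

theorem pvSplitOn_single (c : Char) (l : List Char) :
    PySem.Chars.splitOn l [c] = pvSplitc c l := by
  unfold PySem.Chars.splitOn
  rw [pvGo_eq c (l.length + 1) l (by omega) [] []]
  rcases hE : pvSplitc c l with _ | ⟨p, ps⟩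
  · exact absurd hE (pvSplitc_ne_nil c l)
  · simp

theorem pvSplitc_not_mem (c : Char) (l : List Char) : ∀ p ∈ pvSplitc c l, c ∉ p := by
  induction l with
  | nil => simp [pvSplitc]
  | cons x xs ih =>
    intro p hp
    simp only [pvSplitc] at hp
    by_cases hx : x = c
    · rw [if_pos hx] at hp
      rcases List.mem_cons.1 hp with rfl | hp
      · simp
      · exact ih p hp
    · rw [if_neg hx] at hp
      rcases hE : pvSplitc c xs with _ | ⟨q, qs⟩
      · exact absurd hE (pvSplitc_ne_nil c xs)
      · rw [hE] at hp
        rcases List.mem_cons.1 hp with rfl | hp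
        · intro hmem
          rcases List.mem_cons.1 hmem with h | h
          · exact hx h.symm
          · exact ih q (by simp [hE]) h
        · exact ih p (by simp [hE, hp])

theorem pvSplitc_of_not_mem (c : Char) (l : List Char) (h : c ∉ l) : pvSplitc c l = [l] := by
  induction l with
  | nil => simp [pvSplitc]
  | cons x xs ih =>
    have hx : ¬ (x = c) := fun hh => h (by simp [hh])
    have hxs : pvSplitc c xs = [xs] := ih (fun hh => h (by simp [hh]))
    simp [pvSplitc, hx, hxs]

theorem pvRstrip_eq (l : List Char) :
    PySem.Chars.rstrip l = List.rdropWhile PySem.Chars.isspace l := rfl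

theorem pvStrip_sublist (l : List Char) : List.Sublist (PySem.Chars.strip l) l := by
  unfold PySem.Chars.strip
  rw [pvRstrip_eq]
  exact ((List.rdropWhile_prefix _ _).sublist).trans
    (List.dropWhile_sublist (l := l) PySem.Chars.isspace)

theorem pvStrip_idem (l : List Char) : PySem.Chars.strip (PySem.Chars.strip l) = PySem.Chars.strip l := by
  unfold PySem.Chars.strip PySem.Chars.lstrip
  rw [pvRstrip_eq, pvRstrip_eq]
  set p := PySem.Chars.isspace
  set m := List.dropWhile p l with hm
  have hdw : List.dropWhile p (List.rdropWhile p m) = List.rdropWhile p m := by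
    rw [List.dropWhile_eq_self_iff]
    intro hl
    have hpre := List.rdropWhile_prefix p m
    have hne : List.rdropWhile p m ≠ [] := by
      intro hnil; rw [hnil] at hl; simp at hl
    have hhead := hpre.head hne
    have hm2 : List.dropWhile p m = m := by rw [hm]; exact List.dropWhile_idempotent p l
    have hm0 := List.dropWhile_eq_self_iff.1 hm2
    have hml : 0 < m.length := lt_of_lt_of_le hl hpre.length_le
    rw [List.getElem_zero_eq_head hl, hhead]
    have := hm0 hml
    rwa [List.getElem_zero_eq_head hml] at this
  rw [hdw, List.rdropWhile_idempotent]

theorem pvUpperChar_isspace (c : Char) : PySem.Chars.isspace (PySem.Chars.upperChar c) = PySem.Chars.isspace c := by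
  unfold PySem.Chars.upperChar
  by_cases hl : PySem.Chars.islower c = true
  · rw [if_pos hl]
    have hn : 97 ≤ c.toNat ∧ c.toNat ≤ 122 := by
      simp only [PySem.Chars.islower, Bool.and_eq_true, decide_eq_true_eq, Char.le_def,
        UInt32.le_iff_toBitVec_le, BitVec.le_def] at hl
      exact hl
    have hv : (c.toNat - 32).isValidChar := Or.inl (by omega)
    have ht : (Char.ofNat (c.toNat - 32)).toNat = c.toNat - 32 := by
      rw [Char.toNat_ofNat, if_pos hv]
    have e1 : PySem.Chars.isspace (Char.ofNat (c.toNat - 32)) = false := by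
      unfold PySem.Chars.isspace
      simp only [ht]
      simp only [Bool.or_eq_false_iff, Bool.and_eq_false_iff, decide_eq_false_iff_not]
      omega
    have e2 : PySem.Chars.isspace c = false := by
      unfold PySem.Chars.isspace
      simp only [Bool.or_eq_false_iff, Bool.and_eq_false_iff, decide_eq_false_iff_not]
      omega
    rw [e1, e2]
  · rw [if_neg hl]

theorem pvUpperChar_comma (c : Char) (h : PySem.Chars.upperChar c = ',') : c = ',' := by
  unfold PySem.Chars.upperChar at h
  by_cases hl : PySem.Chars.islower c = true
  · rw [if_pos hl] at h
    have hn : 97 ≤ c.toNat ∧ c.toNat ≤ 122 := by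
      simp only [PySem.Chars.islower, Bool.and_eq_true, decide_eq_true_eq, Char.le_def,
        UInt32.le_iff_toBitVec_le, BitVec.le_def] at hl
      exact hl
    have hv : (c.toNat - 32).isValidChar := Or.inl (by omega)
    have ht := congrArg Char.toNat h
    rw [Char.toNat_ofNat, if_pos hv] at ht
    have : (',' : Char).toNat = 44 := by decide
    omega
  · rw [if_neg hl] at h
    exact h

theorem pvStrip_map_upper (l : List Char) :
    PySem.Chars.strip (List.map PySem.Chars.upperChar l)
      = List.map PySem.Chars.upperChar (PySem.Chars.strip l) := by
  have hp : (fun c => PySem.Chars.isspace (PySem.Chars.upperChar c)) = PySem.Chars.isspace := by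
    funext c; exact pvUpperChar_isspace c
  unfold PySem.Chars.strip PySem.Chars.lstrip PySem.Chars.rstrip
  rw [List.dropWhile_map]
  rw [show PySem.Chars.isspace ∘ PySem.Chars.upperChar = PySem.Chars.isspace from hp]
  rw [← List.map_reverse, List.dropWhile_map,
    show PySem.Chars.isspace ∘ PySem.Chars.upperChar = PySem.Chars.isspace from hp,
    ← List.map_reverse]

theorem pvUpper_strip (l : List Char) (h : PySem.Chars.strip l = l) :
    PySem.Chars.strip (PySem.Chars.upper l) = PySem.Chars.upper l := by
  unfold PySem.Chars.upper
  rw [pvStrip_map_upper, h]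

theorem pvUpper_eq_empty (t : String) (h : PySem.Str.upper t = "") : t = "" := by
  have h2 := congrArg String.toList h
  simp only [PySem.Str.toList_upper, PySem.Chars.upper] at h2
  have : t.toList = [] := by simpa using h2
  have := congrArg String.ofList this
  simpa using this

-- a string is "good" when it is stripped, nonempty and comma-free: A's normalize pass
-- maps such a string to exactly itself
def pvGood (t : String) : Prop :=
  PySem.Chars.strip t.toList = t.toList ∧ t ≠ "" ∧ ',' ∉ t.toList

theorem pvSplitParts (raw : String) :
    (PySem.Str.split? raw ",").getD []
      = (pvSplitc ',' raw.toList).map String.ofList := by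
  simp [PySem.Str.split?, PySem.Chars.split?, pvSplitOn_single,
    show (",".toList : List Char) = [','] from rfl]

theorem pvToks_good (raw t : String) (h : t ∈ pvToks raw) : pvGood t := by
  unfold pvToks at h
  rw [pvSplitParts] at h
  rcases List.mem_filter.1 h with ⟨hmap, hne⟩
  rcases List.mem_map.1 hmap with ⟨part, hpart, rfl⟩
  rcases List.mem_map.1 hpart with ⟨p, hp, rfl⟩
  have hcomma : ',' ∉ p := pvSplitc_not_mem ',' raw.toList p hp
  have htl : (PySem.Str.strip (String.ofList p)).toList = PySem.Chars.strip p := by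
    simp [PySem.Str.toList_strip]
  refine ⟨?_, by simpa using hne, ?_⟩
  · rw [htl, pvStrip_idem]
  · rw [htl]
    intro hmem
    exact hcomma ((pvStrip_sublist p).subset hmem)

theorem pvClean_of_good (t : String) (h : pvGood t) : pvToks t = [t] := by
  rcases h with ⟨hs, hne, hc⟩
  unfold pvToks
  rw [pvSplitParts, pvSplitc_of_not_mem ',' t.toList hc]
  have hst : PySem.Str.strip t = t := by
    have : (PySem.Str.strip t).toList = t.toList := by
      rw [PySem.Str.toList_strip, hs]
    have h2 := congrArg String.ofList this
    simpa using h2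
  simp [hst, hne]

theorem pvGood_canon (t : String) (h : pvGood t) : pvGood (pvCanon t) := by
  unfold pvCanon
  by_cases hw : PySem.Str.upper t = "WARNING"
  · rw [if_pos hw]
    refine ⟨by decide, by decide, by decide⟩
  · rw [if_neg hw]
    rcases h with ⟨hs, hne, hc⟩
    refine ⟨?_, ?_, ?_⟩
    · rw [PySem.Str.toList_upper]
      exact pvUpper_strip t.toList hs
    · intro h0
      exact hne (pvUpper_eq_empty t h0)
    · rw [PySem.Str.toList_upper]
      unfold PySem.Chars.upper
      intro hmem
      rcases List.mem_map.1 hmem with ⟨c, hcm, hcu⟩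
      exact hc (by rwa [pvUpperChar_comma c hcu] at hcm)

theorem pvGood_ex (v t : String) (hv : pvGood v) (h : t ∈ pvEx v) : pvGood t := by
  unfold pvEx at h
  by_cases hw : v = "WARN"
  · rw [if_pos hw] at h
    rcases List.mem_cons.1 h with rfl | h
    · exact ⟨by decide, by decide, by decide⟩
    · simp only [List.mem_singleton] at h
      subst h
      exact ⟨by decide, by decide, by decide⟩
  · rw [if_neg hw] at h
    simp only [List.mem_singleton] at h
    subst h
    exact hv

-- pvFd basics-- pvFd basics
theorem pvFd_subset (s xs : List String) : ∀ y ∈ pvFd s xs, y ∈ xs := by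
  induction xs generalizing s with
  | nil => simp [pvFd]
  | cons x xs ih =>
    intro y hy
    simp only [pvFd] at hy
    split at hy
    · exact List.mem_cons_of_mem _ (ih _ _ hy)
    · rcases List.mem_cons.1 hy with h | h
      · simp [h]
      · exact List.mem_cons_of_mem _ (ih _ _ h)

theorem pvFd_total (s xs : List String) : ∀ y ∈ xs, y ∈ s ∨ y ∈ pvFd s xs := by
  induction xs generalizing s with
  | nil => simp
  | cons x xs ih =>
    intro y hy
    simp only [pvFd]
    rcases List.mem_cons.1 hy with rfl | hy
    · by_cases hx : y ∈ s
      · simp [hx]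
      · simp [hx]
    · by_cases hx : x ∈ s
      · simpa [hx] using ih s y hy
      · simp only [hx, if_false]
        rcases ih (s ++ [x]) y hy with h | h
        · rcases List.mem_append.1 h with h | h
          · exact Or.inl h
          · simp at h; simp [h]
        · simp [h]

theorem pvFd_eq_nil (s xs : List String) (h : ∀ y ∈ xs, y ∈ s) : pvFd s xs = [] := by
  induction xs generalizing s with
  | nil => simp [pvFd]
  | cons x xs ih =>
    simp only [pvFd]
    rw [if_pos (h x (by simp))]
    exact ih s (fun y hy => h y (by simp [hy]))

theorem pvFd_append (s xs ys : List String) :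
    pvFd s (xs ++ ys) = pvFd s xs ++ pvFd (s ++ pvFd s xs) ys := by
  induction xs generalizing s with
  | nil => simp [pvFd]
  | cons x xs ih =>
    simp only [List.cons_append, pvFd]
    by_cases hx : x ∈ s
    · simp [hx, ih]
    · simp only [hx, if_false, List.cons_append]
      rw [ih]
      simp

theorem pvFd_flatMap_pvFd (g : String → List String) :
    ∀ (xs sA sB : List String), (∀ x ∈ sA, ∀ y ∈ g x, y ∈ sB) →
      pvFd sB ((pvFd sA xs).flatMap g) = pvFd sB (xs.flatMap g) := by
  intro xs
  induction xs with
  | nil => intro sA sB h; simp [pvFd]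
  | cons x xs ih =>
    intro sA sB h
    simp only [pvFd, List.flatMap_cons]
    by_cases hx : x ∈ sA
    · rw [if_pos hx, pvFd_append, pvFd_eq_nil sB (g x) (h x hx)]
      simp only [List.append_nil, List.nil_append]
      exact ih sA sB h
    · rw [if_neg hx]
      simp only [List.flatMap_cons]
      rw [pvFd_append, pvFd_append]
      congr 1
      rw [ih (sA ++ [x]) (sB ++ pvFd sB (g x)) ?_]
      intro x' hx' y hy
      rcases List.mem_append.1 hx' with hx' | hx'
      · exact List.mem_append.2 (Or.inl (h x' hx' y hy))
      · simp only [List.mem_singleton] at hx'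
        subst hx'
        exact List.mem_append.2 (pvFd_total sB (g x') y hy)

-- the seen-set fold is pvFd
theorem pvFold_dd (ys out seen : List String) :
    ys.foldl
      (fun (st : List String × PySem.Set String) value =>
        if value ∉ st.2 then (st.1 ++ [value], PySem.Set.add st.2 value) else st)
      (out, seen)
    = (out ++ pvFd seen ys, seen ++ pvFd seen ys) := by
  induction ys generalizing out seen with
  | nil => simp [pvFd]
  | cons y ys ih =>
    simp only [List.foldl_cons, pvFd]
    by_cases hy : y ∈ seen
    · simp only [hy, not_true, if_pos, ite_false]
      exact ih out seen
    · have hadd : PySem.Set.add seen y = seen ++ [y] := by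
        simp [PySem.Set.add, PySem.Set.contains, hy]
      simp only [hy, not_false_iff, if_pos, hadd]
      rw [ih]
      simp []

theorem pvFold_A_inner (parts : List String) (out seen : List String) :
    parts.foldl
      (fun (st : List String × PySem.Set String) part =>
        let item := PySem.Str.strip part
        if item ≠ "" ∧ item ∉ st.2 then (st.1 ++ [item], PySem.Set.add st.2 item) else st)
      (out, seen)
    = (out ++ pvFd seen ((parts.map PySem.Str.strip).filter (fun t => t ≠ "")),
       seen ++ pvFd seen ((parts.map PySem.Str.strip).filter (fun t => t ≠ ""))) := by
  induction parts generalizing out seen with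
  | nil => simp [pvFd]
  | cons p ps ih =>
    simp only [List.foldl_cons, List.map_cons, List.filter_cons]
    by_cases hp : PySem.Str.strip p = ""
    · rw [if_neg (by simp [hp])]
      simp only [hp]
      simpa using ih out seen
    · by_cases hmem : PySem.Str.strip p ∈ seen
      · rw [if_neg (by simp [hmem])]
        simp only [hp, decide_not, if_true, pvFd, hmem,
          decide_false, Bool.not_false]
        simpa using ih out seen
      · have hadd : PySem.Set.add seen (PySem.Str.strip p) = seen ++ [PySem.Str.strip p] := by
          simp [PySem.Set.add, PySem.Set.contains, hmem]
        rw [if_pos ⟨hp, hmem⟩]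
        simp only [hp, decide_not, if_true, pvFd, hmem,
          ite_false, hadd, decide_false, Bool.not_false]
        rw [ih]
        simp []

theorem pvFold_A_outer (xs : List String) (out seen : List String) :
    xs.foldl
      (fun (st : List String × PySem.Set String) raw =>
        ((PySem.Str.split? raw ",").getD []).foldl
          (fun (st : List String × PySem.Set String) part =>
            let item := PySem.Str.strip part
            if item ≠ "" ∧ item ∉ st.2 then (st.1 ++ [item], PySem.Set.add st.2 item) else st)
          st)
      (out, seen)
    = (out ++ pvFd seen (xs.flatMap pvToks), seen ++ pvFd seen (xs.flatMap pvToks)) := by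
  induction xs generalizing out seen with
  | nil => simp [pvFd]
  | cons x xs ih =>
    simp only [List.foldl_cons, List.flatMap_cons]
    rw [pvFold_A_inner, ih, pvFd_append]
    simp [pvToks, List.append_assoc]

theorem pvNorm_eq (xs : List String) :
    pvNormalizeOptionalStrList xs = pvFd [] (xs.flatMap pvToks) := by
  unfold pvNormalizeOptionalStrList
  rw [show (PySem.Set.empty : PySem.Set String) = ([] : List String) from rfl, pvFold_A_outer]
  simp

theorem pvNorm_clean (ys : List String) (h : ∀ y ∈ ys, pvToks y = [y]) :
    pvNormalizeOptionalStrList ys = pvFd [] ys := by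
  rw [pvNorm_eq]
  congr 1
  calc ys.flatMap pvToks = ys.flatMap (fun y => [y]) :=
        List.flatMap_congr (fun y hy => h y hy)
    _ = ys.map (fun y => y) := (List.map_eq_flatMap).symm
    _ = ys := List.map_id' ys

theorem pvFold_B_inner (parts : List String) (out seen : List String) :
    parts.foldl
      (fun (st : List String × PySem.Set String) part =>
        let token := PySem.Str.upper (PySem.Str.strip part)
        if token = "" then st
        else
          let token := if token = "WARNING" then "WARN" else token
          (if token = "WARN" then ["WARN", "WARNING"] else [token]).foldl
            (fun (st : List String × PySem.Set String) value =>
              if value ∉ st.2 then (st.1 ++ [value], PySem.Set.add st.2 value) else st)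
            st)
      (out, seen)
    = (out ++ pvFd seen (((parts.map PySem.Str.strip).filter (fun t => t ≠ "")).flatMap
          (fun t => pvEx (pvCanon t))),
       seen ++ pvFd seen (((parts.map PySem.Str.strip).filter (fun t => t ≠ "")).flatMap
          (fun t => pvEx (pvCanon t)))) := by
  induction parts generalizing out seen with
  | nil => simp [pvFd]
  | cons p ps ih =>
    simp only [List.foldl_cons, List.map_cons, List.filter_cons]
    by_cases hp : PySem.Str.strip p = ""
    · rw [if_pos (by rw [hp]; rfl)]
      simp only [hp]
      simpa using ih out seen
    · have htok : PySem.Str.upper (PySem.Str.strip p) ≠ "" :=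
        fun h => hp (pvUpper_eq_empty _ h)
      rw [if_neg htok]
      have hemit : (if (if PySem.Str.upper (PySem.Str.strip p) = "WARNING" then "WARN"
            else PySem.Str.upper (PySem.Str.strip p)) = "WARN" then ["WARN", "WARNING"]
            else [if PySem.Str.upper (PySem.Str.strip p) = "WARNING" then "WARN"
            else PySem.Str.upper (PySem.Str.strip p)]) = pvEx (pvCanon (PySem.Str.strip p)) := rfl
      rw [hemit, pvFold_dd, ih]
      simp only [hp, decide_not, if_true, decide_false,
        Bool.not_false, List.flatMap_cons]
      rw [pvFd_append]
      simp [List.append_assoc]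

theorem pvFold_B_outer (xs : List String) (out seen : List String) :
    xs.foldl
      (fun (st : List String × PySem.Set String) raw =>
        ((PySem.Str.split? raw ",").getD []).foldl
          (fun (st : List String × PySem.Set String) part =>
            let token := PySem.Str.upper (PySem.Str.strip part)
            if token = "" then st
            else
              let token := if token = "WARNING" then "WARN" else token
              (if token = "WARN" then ["WARN", "WARNING"] else [token]).foldl
                (fun (st : List String × PySem.Set String) value =>
                  if value ∉ st.2 then (st.1 ++ [value], PySem.Set.add st.2 value) else st)
                st)
          st)
      (out, seen)
    = (out ++ pvFd seen ((xs.flatMap pvToks).flatMap (fun t => pvEx (pvCanon t))),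
       seen ++ pvFd seen ((xs.flatMap pvToks).flatMap (fun t => pvEx (pvCanon t)))) := by
  induction xs generalizing out seen with
  | nil => simp [pvFd]
  | cons x xs ih =>
    simp only [List.foldl_cons, List.flatMap_cons, List.flatMap_append]
    rw [pvFold_B_inner, ih, pvFd_append]
    simp [pvToks, List.append_assoc]

theorem pvAlt_eq (levels : List String) :
    expand_level_match_values_alt levels
      = pvFd [] ((levels.flatMap pvToks).flatMap (fun t => pvEx (pvCanon t))) := by
  unfold expand_level_match_values_alt
  rw [show (PySem.Set.empty : PySem.Set String) = ([] : List String) from rfl, pvFold_B_outer]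
  simp

theorem pvA_eq (levels : List String) :
    expand_level_match_values levels
      = pvFd [] ((levels.flatMap pvToks).flatMap (fun t => pvEx (pvCanon t))) := by
  have hmap : ∀ (l acc : List String),
      l.foldl (fun (acc : List String) item =>
        let normalized := PySem.Str.upper item
        let normalized := if normalized = "WARNING" then "WARN" else normalized
        acc ++ [normalized]) acc = acc ++ l.map pvCanon := by
    intro l acc
    exact PySem.List.foldl_append_singleton_eq_map pvCanon l acc
  have hexp : ∀ (l acc : List String),
      l.foldl (fun (acc : List String) level =>
        if level = "WARN" then acc ++ ["WARN", "WARNING"] else acc ++ [level]) acc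
        = acc ++ l.flatMap pvEx := by
    intro l acc
    have hfun : (fun (acc : List String) level =>
        if level = "WARN" then acc ++ ["WARN", "WARNING"] else acc ++ [level])
        = (fun (acc : List String) level => acc ++ pvEx level) := by
      funext a b
      unfold pvEx
      split <;> rfl
    rw [hfun]
    exact PySem.List.foldl_append_eq_flatMap pvEx l acc
  unfold expand_level_match_values pvNormalizeLevelValues
  rw [hmap, hexp, List.nil_append, List.nil_append]
  rw [pvNorm_eq levels]
  have hTs : ∀ t ∈ levels.flatMap pvToks, pvGood t := by
    intro t ht
    rcases List.mem_flatMap.1 ht with ⟨raw, _, hraw⟩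
    exact pvToks_good raw t hraw
  have hmid : pvNormalizeOptionalStrList ((pvFd [] (levels.flatMap pvToks)).map pvCanon)
      = pvFd [] ((levels.flatMap pvToks).map pvCanon) := by
    rw [pvNorm_clean]
    · rw [List.map_eq_flatMap, List.map_eq_flatMap]
      exact pvFd_flatMap_pvFd (fun t => [pvCanon t]) (levels.flatMap pvToks) [] [] (by simp)
    · intro y hy
      rcases List.mem_map.1 hy with ⟨t, ht, rfl⟩
      exact pvClean_of_good _ (pvGood_canon t (hTs t (pvFd_subset _ _ t ht)))
  rw [hmid]
  have hmidgood : ∀ t ∈ pvFd [] ((levels.flatMap pvToks).map pvCanon), pvGood t := by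
    intro t ht
    rcases List.mem_map.1 (pvFd_subset _ _ t ht) with ⟨u, hu, rfl⟩
    exact pvGood_canon u (hTs u hu)
  rw [pvNorm_clean _ ?hclean]
  case hclean =>
    intro y hy
    rcases List.mem_flatMap.1 hy with ⟨v, hv, hyv⟩
    exact pvClean_of_good _ (pvGood_ex v y (hmidgood v hv) hyv)
  rw [pvFd_flatMap_pvFd pvEx ((levels.flatMap pvToks).map pvCanon) [] [] (by simp)]
  rw [List.flatMap_map]

-- ===== VERDICT (by name: the statement is the Claim_ definition above) =====
theorem expand_level_match_values_spec : Claim_equal_expand_level_match_values := by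
  intro levels _
  unfold Spec_expand_level_match_values
  rw [pvA_eq, pvAlt_eq]
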